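-- pv_equiv track=rewrite | github.com/Yalfoosh/Advent-of-Code-2019 | day4.py | first_check
-- ===== SOURCE A (Python) =====
-- def first_check(vector):
--     valid = False
--
--     for i in range(1, len(vector)):
--         if vector[i] == vector[i - 1]:
--             valid = True
--         elif vector[i] < vector[i - 1]:
--             return False
--
--     return valid
-- ===== SOURCE B (Python) =====
-- def first_check(vector):
--     return list(vector) == sorted(vector) and len(set(vector)) != len(vector)
-- ===== Notes on version B (the rewrite author's own statement) =====
-- stated objective: simpler
-- what changed: Replaces the index loop with pairwise comparisons and early return by a sort-comparison for the non-decreasing test plus a set-cardinality test for a repeated (hence, when sorted, adjacent) value, in one line.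
import Mathlib
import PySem

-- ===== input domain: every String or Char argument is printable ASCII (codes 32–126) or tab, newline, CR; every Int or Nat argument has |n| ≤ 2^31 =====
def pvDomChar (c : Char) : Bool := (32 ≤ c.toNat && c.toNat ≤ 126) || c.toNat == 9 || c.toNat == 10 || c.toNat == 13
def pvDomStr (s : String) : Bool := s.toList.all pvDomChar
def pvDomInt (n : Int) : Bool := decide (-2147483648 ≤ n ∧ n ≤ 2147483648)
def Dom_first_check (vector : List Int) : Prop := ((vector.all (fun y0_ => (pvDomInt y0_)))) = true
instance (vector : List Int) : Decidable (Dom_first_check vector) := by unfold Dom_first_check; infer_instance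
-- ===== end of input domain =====

-- B replaces A's single pairwise loop with a sort-comparison plus a set-cardinality duplicate test (objective: simpler).

-- ===== PORT A =====
-- the for-loop over range(1, len(vector)) with early return; the loop's indices are always in range, so pyGetD _ _ 0 is exact
def first_check_loop (vector : List Int) : List Int → Bool → Bool
  | [], valid => valid
  | i :: rest, valid =>
    if PySem.List.pyGetD vector i 0 == PySem.List.pyGetD vector (i - 1) 0 then
      first_check_loop vector rest true
    else if PySem.List.pyGetD vector i 0 < PySem.List.pyGetD vector (i - 1) 0 then
      false
    else
      first_check_loop vector rest valid

def first_check (vector : List Int) : Bool :=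
  first_check_loop vector (PySem.List.pyRange 1 (vector.length : Int) 1) false

-- ===== PORT B =====
def first_check_alt (vector : List Int) : Bool :=
  (vector == PySem.List.sorted vector (fun x => x) false) &&
  !((PySem.Set.ofList vector).length == vector.length)

-- ===== PRECONDITION & SPEC =====
def Spec_first_check (vector : List Int) (out : Bool) : Prop := out = first_check_alt vector
instance (vector : List Int) (out : Bool) : Decidable (Spec_first_check vector out) := by unfold Spec_first_check; infer_instance

-- ===== CLAIM (what is proved, stated in full; the proofs are below) =====
def Claim_equal_first_check : Prop := ∀ (vector : List Int), Dom_first_check vector → Spec_first_check vector (first_check vector)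

-- ===== LEMMAS AND PROOFS =====

-- abstract pair-walk: A's loop after the indices are eliminated
def pvPairs : List Int → Bool → Bool
  | a :: b :: rest, valid =>
    if b == a then pvPairs (b :: rest) true
    else if b < a then false
    else pvPairs (b :: rest) valid
  | _, valid => valid

-- adjacent-equal detector
def pvAdjEq : List Int → Bool
  | a :: b :: rest => a == b || pvAdjEq (b :: rest)
  | _ => false

theorem pvPairs_short (l : List Int) (valid : Bool) (h : l.length ≤ 1) :
    pvPairs l valid = valid := by
  match l with
  | [] => rfl
  | [_] => rfl
  | _ :: _ :: _ => simp at h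

theorem pvLoop_eq (v : List Int) :
    ∀ (n k : Nat) (valid : Bool), v.length - k ≤ n →
      first_check_loop v (PySem.List.pyRange ((k : Int) + 1) (v.length : Int) 1) valid
        = pvPairs (v.drop k) valid := by
  intro n
  induction n with
  | zero =>
    intro k valid h
    have hk : v.length ≤ k := by omega
    rw [PySem.List.pyRange_one_eq_nil (by exact_mod_cast Nat.le_succ_of_le hk)]
    rw [pvPairs_short _ _ (by simp; omega)]
    rfl
  | succ n ih =>
    intro k valid h
    by_cases hk : k + 1 < v.length
    · rw [PySem.List.pyRange_one_cons (by exact_mod_cast hk)]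
      have hget1 : PySem.List.pyGetD v ((k : Int) + 1) 0 = v[k + 1] := by
        rw [PySem.List.pyGetD_eq_getElem v 0 (by omega) (by exact_mod_cast Nat.lt_of_succ_le hk)]
        simp
      have hget0 : PySem.List.pyGetD v ((k : Int) + 1 - 1) 0 = v[k]'(by omega) := by
        rw [PySem.List.pyGetD_eq_getElem v 0 (by omega) (by omega)]
        simp
      have hdrop : v.drop k = v[k]'(by omega) :: v[k + 1] :: v.drop (k + 2) := by
        rw [List.drop_eq_getElem_cons (by omega), List.drop_eq_getElem_cons hk]
      have hrec : ∀ b, first_check_loop v (PySem.List.pyRange ((k : Int) + 1 + 1) (v.length : Int) 1) b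
          = pvPairs (v.drop (k + 1)) b := by
        intro b
        have := ih (k + 1) b (by omega)
        simpa [add_assoc] using this
      have hdrop1 : v.drop (k + 1) = v[k + 1] :: v.drop (k + 2) :=
        List.drop_eq_getElem_cons hk
      rw [hdrop]
      show (if PySem.List.pyGetD v ((k:Int)+1) 0 == PySem.List.pyGetD v ((k:Int)+1-1) 0 then _ else _) = _
      rw [hget1, hget0]
      simp only [pvPairs]
      split_ifs with h1 h2
      · rw [hrec true, hdrop1]
      · rfl
      · rw [hrec valid, hdrop1]
    · rw [PySem.List.pyRange_one_eq_nil (by omega)]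
      rw [pvPairs_short _ _ (by simp; omega)]
      rfl

theorem pvPairs_spec : ∀ (l : List Int) (valid : Bool),
    pvPairs l valid = (decide (l.IsChain (· ≤ ·)) && (valid || pvAdjEq l)) := by
  intro l
  match l with
  | [] => intro valid; simp [pvPairs, pvAdjEq]
  | [x] => intro valid; simp [pvPairs, pvAdjEq]
  | a :: b :: rest =>
    intro valid
    have ih := pvPairs_spec (b :: rest)
    simp only [pvPairs, pvAdjEq]
    split_ifs with h1 h2
    · have hab : b = a := by simpa using h1
      rw [ih true]
      simp [List.isChain_cons, hab]
    · have : ¬ ((a :: b :: rest).IsChain (· ≤ ·)) := by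
        simp [List.isChain_cons]
        intro hab
        omega
      simp [this]
    · have hab : a < b := by
        simp at h1 h2
        omega
      rw [ih valid]
      have hne : (a == b) = false := by simp; omega
      simp [List.isChain_cons, le_of_lt hab, hne]

theorem pvAdjEq_iff (l : List Int) (h : l.IsChain (· ≤ ·)) :
    pvAdjEq l = true ↔ ¬ l.Nodup := by
  match l with
  | [] => simp [pvAdjEq]
  | [x] => simp [pvAdjEq]
  | a :: b :: rest =>
    have hp := (List.isChain_iff_pairwise.1 h)
    have htail : (b :: rest).IsChain (· ≤ ·) := h.tail
    have ih := pvAdjEq_iff (b :: rest) htail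
    simp only [pvAdjEq, Bool.or_eq_true, ih]
    by_cases hab : a = b
    · subst hab
      simp [List.nodup_cons]
    · have hmem : a ∉ b :: rest := by
        intro hm
        rcases List.mem_cons.1 hm with h1 | h2
        · exact hab h1
        · have h3 : a ≤ b := (List.pairwise_cons.1 hp).1 b (by simp)
          have h4 : b ≤ a := (List.pairwise_cons.1 (List.pairwise_cons.1 hp).2).1 a h2
          exact hab (le_antisymm h3 h4)
      simp [List.nodup_cons, hab, hmem]

theorem pvOfList_sublist (l : List Int) : (PySem.Set.ofList l).Sublist l := by
  match l with
  | [] => simp [PySem.Set.ofList_nil]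
  | x :: xs =>
    rw [PySem.Set.ofList_cons]
    refine List.Sublist.cons₂ x ?_
    exact List.Sublist.trans (by simp [PySem.Set.discard]) (pvOfList_sublist xs)

theorem pvLen_ofList_eq_iff (l : List Int) :
    (PySem.Set.ofList l).length = l.length ↔ l.Nodup := by
  constructor
  · intro h
    have := (pvOfList_sublist l).eq_of_length h
    rw [← this]
    exact PySem.Set.nodup_ofList l
  · intro h
    rw [PySem.Set.ofList_eq_self_of_nodup l h]

theorem pvSorted_eq_iff (l : List Int) :
    l = PySem.List.sorted l (fun x => x) false ↔ l.IsChain (· ≤ ·) := by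
  constructor
  · intro h
    rw [List.isChain_iff_pairwise]
    have := PySem.List.sorted_pairwise l (fun x => x)
    rw [← h] at this
    simpa using this
  · intro h
    rw [PySem.List.sorted_eq_self_of_pairwise]
    simpa using (List.isChain_iff_pairwise.1 h)

-- ===== VERDICT (by name: the statement is the Claim_ definition above) =====
theorem first_check_spec : Claim_equal_first_check := by
  intro v _
  unfold Spec_first_check
  have h0 : first_check v = pvPairs v false := by
    have := pvLoop_eq v v.length 0 false (by omega)
    simpa [first_check] using this
  rw [h0, pvPairs_spec, first_check_alt]
  by_cases hc : v.IsChain (· ≤ ·)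
  · have hs : v = PySem.List.sorted v (fun x => x) false := (pvSorted_eq_iff v).2 hc
    simp only [hc, decide_true, Bool.true_and, Bool.false_or, ← hs, BEq.rfl]
    by_cases hn : v.Nodup
    · have : pvAdjEq v = false := by
        rcases Bool.eq_false_or_eq_true (pvAdjEq v) with h | h
        · exact absurd hn ((pvAdjEq_iff v hc).1 h)
        · exact h
      simp [this, (pvLen_ofList_eq_iff v).2 hn]
    · have h1 : pvAdjEq v = true := (pvAdjEq_iff v hc).2 hn
      have h2 : (PySem.Set.ofList v).length ≠ v.length := fun h => hn ((pvLen_ofList_eq_iff v).1 h)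
      simp [h1, h2]
  · have hs : v ≠ PySem.List.sorted v (fun x => x) false := fun h => hc ((pvSorted_eq_iff v).1 h)
    simp [hc, hs]
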